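-- pv_equiv track=rewrite | github.com/udayagirisupraja/DjangoWebProject1 | DjangoWebProject1/app/py_Files/ION_Messaging_Service.py | getLists
-- ===== SOURCE A (Python) =====
-- def getLists(raw_KeyWords):
--     category_List = [[], [], []]
--     for keyWords in raw_KeyWords:
--         if (' info ' in keyWords[0]):
--             category_List[0].append(keyWords)
--         elif(' warn ' in keyWords[0]):
--             category_List[1].append(keyWords)
--         elif(' error ' in keyWords[0]):
--             category_List[2].append(keyWords)
--     return(category_List)
-- ===== SOURCE B (Python) =====
-- def getLists(raw_KeyWords):
--     # Three independent filter passes, one per category; first-match priority is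
--     # expressed by excluding the higher-priority tags in the later filters.
--     return [
--         [e for e in raw_KeyWords if ' info ' in e[0]],
--         [e for e in raw_KeyWords if ' warn ' in e[0] and ' info ' not in e[0]],
--         [e for e in raw_KeyWords
--          if ' error ' in e[0] and ' warn ' not in e[0] and ' info ' not in e[0]],
--     ]
-- ===== Notes on version B (the rewrite author's own statement) =====
-- stated objective: alternative
-- what changed: Replaces the single loop with a mutated triple of lists and an elif-cascade by three independent filter comprehensions, one per category, encoding the info>warn>error priority as exclusion predicates.
import Mathlib
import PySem

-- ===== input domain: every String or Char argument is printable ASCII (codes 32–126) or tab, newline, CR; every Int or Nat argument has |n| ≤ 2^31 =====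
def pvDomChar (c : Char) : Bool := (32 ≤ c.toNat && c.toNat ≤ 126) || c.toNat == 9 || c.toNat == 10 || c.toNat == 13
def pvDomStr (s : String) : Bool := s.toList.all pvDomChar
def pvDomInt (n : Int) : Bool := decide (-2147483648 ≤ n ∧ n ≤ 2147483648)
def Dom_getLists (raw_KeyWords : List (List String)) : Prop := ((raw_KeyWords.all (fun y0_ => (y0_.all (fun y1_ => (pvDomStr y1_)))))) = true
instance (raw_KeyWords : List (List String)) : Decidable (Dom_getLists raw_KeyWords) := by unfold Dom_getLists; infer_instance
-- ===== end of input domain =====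

-- B replaces A's single loop over a mutated triple of lists (elif-cascade) by three
-- independent filter passes, one per category, with priority encoded as exclusion predicates.


-- ===== PORT A =====
-- keyWords[0] → (pyGet? 0).getD ""; Pre_ guarantees the index is in range in Python.
def getLists (raw_KeyWords : List (List String)) : List (List (List String)) :=
  let s := raw_KeyWords.foldl
    (fun (c : List (List String) × List (List String) × List (List String)) keyWords =>
      let h := (PySem.List.pyGet? keyWords 0).getD ""
      if PySem.Str.isIn " info " h then (c.1 ++ [keyWords], c.2.1, c.2.2)
      else if PySem.Str.isIn " warn " h then (c.1, c.2.1 ++ [keyWords], c.2.2)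
      else if PySem.Str.isIn " error " h then (c.1, c.2.1, c.2.2 ++ [keyWords])
      else c)
    ([], [], [])
  [s.1, s.2.1, s.2.2]

-- ===== PORT B =====
def tagInfo (e : List String) : Bool := PySem.Str.isIn " info " ((PySem.List.pyGet? e 0).getD "")
def tagWarn (e : List String) : Bool := PySem.Str.isIn " warn " ((PySem.List.pyGet? e 0).getD "") && !tagInfo e
def tagError (e : List String) : Bool := PySem.Str.isIn " error " ((PySem.List.pyGet? e 0).getD "") && !tagWarn e && !tagInfo e

def getLists_alt (raw_KeyWords : List (List String)) : List (List (List String)) :=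
  [raw_KeyWords.filter tagInfo, raw_KeyWords.filter tagWarn, raw_KeyWords.filter tagError]

-- ===== PRECONDITION & SPEC =====
-- Pre_ excludes inputs containing an empty inner list, on which A (and B) raise IndexError at keyWords[0].
def Pre_getLists (raw_KeyWords : List (List String)) : Prop := ∀ kw ∈ raw_KeyWords, kw ≠ []
instance (raw_KeyWords : List (List String)) : Decidable (Pre_getLists raw_KeyWords) := by unfold Pre_getLists; infer_instance
def pvWitness_getLists : List (List String) := [[" info x"], ["a warn b"], ["plain"]]

def Spec_getLists (raw_KeyWords : List (List String)) (out : List (List (List String))) : Prop := out = getLists_alt raw_KeyWords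
instance (raw_KeyWords : List (List String)) (out : List (List (List String))) : Decidable (Spec_getLists raw_KeyWords out) := by unfold Spec_getLists; infer_instance

-- ===== CLAIM (what is proved, stated in full; the proofs are below) =====
def Claim_equal_getLists : Prop := ∀ (raw_KeyWords : List (List String)), Dom_getLists raw_KeyWords → Pre_getLists raw_KeyWords → Spec_getLists raw_KeyWords (getLists raw_KeyWords)

-- ===== LEMMAS AND PROOFS =====
-- Loop invariant: A's fold from accumulators (a,b,c) prepends them to B's three filters.
lemma getLists_fold_inv (raw_KeyWords : List (List String))
    (a b c : List (List String)) :
    raw_KeyWords.foldl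
      (fun (c : List (List String) × List (List String) × List (List String)) keyWords =>
        let h := (PySem.List.pyGet? keyWords 0).getD ""
        if PySem.Str.isIn " info " h then (c.1 ++ [keyWords], c.2.1, c.2.2)
        else if PySem.Str.isIn " warn " h then (c.1, c.2.1 ++ [keyWords], c.2.2)
        else if PySem.Str.isIn " error " h then (c.1, c.2.1, c.2.2 ++ [keyWords])
        else c)
      (a, b, c)
    = (a ++ raw_KeyWords.filter tagInfo,
       b ++ raw_KeyWords.filter tagWarn,
       c ++ raw_KeyWords.filter tagError) := by
  induction raw_KeyWords generalizing a b c with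
  | nil => simp
  | cons kw t ih =>
    simp only [List.foldl_cons, List.filter_cons]
    simp [PySem.Chars.isIn_iff_infix, PySem.Chars.isIn_eq_false_iff] at ih
    by_cases hi : PySem.Str.isIn " info " ((PySem.List.pyGet? kw 0).getD "") = true <;>
      by_cases hw : PySem.Str.isIn " warn " ((PySem.List.pyGet? kw 0).getD "") = true <;>
        by_cases he : PySem.Str.isIn " error " ((PySem.List.pyGet? kw 0).getD "") = true <;>
          simp [PySem.Str.isIn_iff_infix] at hi hw he <;>
            simp [tagInfo, tagWarn, tagError, PySem.Chars.isIn_iff_infix,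
              PySem.Chars.isIn_eq_false_iff, hi, hw, he, ih]

-- ===== VERDICT (by name: the statement is the Claim_ definition above) =====
theorem getLists_spec : Claim_equal_getLists := by
  intro raw _ _
  unfold Spec_getLists getLists getLists_alt
  rw [getLists_fold_inv]
  simp
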